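-- pv_equiv track=rewrite | github.com/PeterAugustinak/advent-of-code-2021 | src/day13.py | get_folded_paper
-- ===== SOURCE A (Python) =====
-- def get_folded_paper(folded_paper, fold_instructions):
--     """Recursively takes folded paper and fold it based on instruction"""
--
--     if fold_instructions:
--         if fold_instructions[0][0] == 'x':
--             folded_paper = fold_left_right(folded_paper, fold_instructions[0][1])
--
--         if fold_instructions[0][0] == 'y':
--             folded_paper = fold_bottom_up(folded_paper, fold_instructions[0][1])
--
--         fold_instructions = fold_instructions[1:]
--         return get_folded_paper(folded_paper, fold_instructions)
--     else:
--         return folded_paper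
--
-- def fold_left_right(paper, on_position):
--     """Folds every row on the paper left to right"""
--
--     on_position = int(on_position)
--
--     folded_paper = []
--     for row in paper:
--         first_half = row[:on_position]
--         second_half = row[on_position+1:]
--         second_half = second_half[::-1]
--
--         folded_row = first_half
--         for pos, i in enumerate(second_half):
--             if i == '#':
--                 folded_row[pos] = i
--         folded_paper.append(folded_row)
--
--     return folded_paper
--
-- def fold_bottom_up(paper, on_position):
--     """Folds bottom half of the list to up"""
--
--     on_position = int(on_position)
--     paper_len = len(paper)
--
--     if paper_len % 2 == 0:
--         first_half = paper[:on_position]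
--         second_half = paper[on_position:]
--
--     else:
--         first_half = paper[:on_position]
--         second_half = paper[on_position+1:]
--
--     second_half = second_half[::-1]
--     folded_paper = first_half
--
--     for row_num, row in enumerate(second_half):
--         for char_pos, char in enumerate(row):
--             if char == '#':
--                 folded_paper[row_num][char_pos] = char
--
--     return folded_paper
-- ===== SOURCE B (Python) =====
-- def _merge_row(first, second):
--     """Overlay the mirrored half onto the kept half, keeping '#' dots."""
--     return [b if b == '#' else a for a, b in zip(first, second)] + first[len(second):]
--
-- def get_folded_paper(folded_paper, fold_instructions):
--     """Iteratively applies each fold by overlaying the reversed far half onto the kept half."""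
--     paper = folded_paper
--     for instr in fold_instructions:
--         axis = instr[0]
--         if axis == 'x':
--             p = int(instr[1])
--             paper = [_merge_row(row[:p], row[p + 1:][::-1]) for row in paper]
--         elif axis == 'y':
--             p = int(instr[1])
--             keep = paper[:p]
--             flap = paper[p:] if len(paper) % 2 == 0 else paper[p + 1:]
--             flap = flap[::-1]
--             paper = [_merge_row(r1, r2) for r1, r2 in zip(keep, flap)] + keep[len(flap):]
--     return paper
-- ===== Notes on version B (the rewrite author's own statement) =====
-- stated objective: simpler
-- what changed: A's recursion over instructions with two helpers that fold by writing '#' cells index-by-index into (partly in-place mutated) rows is replaced by a single iterative loop whose x- and y-folds are both expressed through one zip-based overlay helper building fresh rows.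
-- outside the precondition, e.g. on get_folded_paper([['.'], ['.'], ['.'], ['.']], [['y', '1']]): A returns [['.']], B returns [['.']]; on get_folded_paper([['#', '.'], ['#']], [['x', '1']]): A returns [['#'], ['#']], B returns [['#'], ['#']]
import Mathlib
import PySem

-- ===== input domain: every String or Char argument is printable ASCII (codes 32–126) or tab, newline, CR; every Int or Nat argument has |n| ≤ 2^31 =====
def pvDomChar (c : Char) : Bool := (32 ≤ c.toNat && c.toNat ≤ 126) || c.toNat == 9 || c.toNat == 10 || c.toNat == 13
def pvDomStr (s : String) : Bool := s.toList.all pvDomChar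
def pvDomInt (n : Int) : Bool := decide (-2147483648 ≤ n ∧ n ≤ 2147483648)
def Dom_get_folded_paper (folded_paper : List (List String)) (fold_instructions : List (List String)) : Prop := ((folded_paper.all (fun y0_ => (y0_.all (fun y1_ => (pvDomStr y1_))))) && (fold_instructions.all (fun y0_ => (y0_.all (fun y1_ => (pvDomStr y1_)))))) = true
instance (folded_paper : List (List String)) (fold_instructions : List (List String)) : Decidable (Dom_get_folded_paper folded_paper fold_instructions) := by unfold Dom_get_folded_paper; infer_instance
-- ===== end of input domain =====

-- B replaces A's recursion-plus-in-place-index-mutation by one fold over the instructions whose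
-- halves are combined with a single zip-based overlay helper (objective: simpler); return-value
-- equivalence only: A's fold_bottom_up mutates the caller's rows in place, B never mutates.

-- int(s), used by both ports; ofStr? = none is a ValueError, excluded by Pre_
def pvParseInt (s : String) : Int := (PySem.Int.ofStr? s).getD 0

-- ===== PORT A =====

-- fold_left_right: row[:p], row[p+1:][::-1] ([::-1] = reverse), then 'folded_row[pos] = i'
-- is pySetD (its none-case, Python's IndexError, is excluded by Pre_)
def fold_left_right (paper : List (List String)) (on_position : String) : List (List String) :=
  let p : Int := pvParseInt on_position
  paper.foldl (fun folded_paper row =>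
    let first_half := PySem.List.slice row none (some p)
    let second_half := (PySem.List.slice row (some (p+1)) none).reverse
    let folded_row := (PySem.List.enumerate second_half 0).foldl
      (fun fr pi => if pi.2 == "#" then PySem.List.pySetD fr pi.1 pi.2 else fr) first_half
    folded_paper ++ [folded_row]) []

-- fold_bottom_up: 'folded_paper[row_num][char_pos] = char' is a read-modify-write of row row_num
-- (pyGetD/pySetD; the out-of-range IndexError cases are excluded by Pre_)
def fold_bottom_up (paper : List (List String)) (on_position : String) : List (List String) :=
  let p : Int := pvParseInt on_position
  let halves :=
    if paper.length % 2 == 0 then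
      (PySem.List.slice paper none (some p), PySem.List.slice paper (some p) none)
    else
      (PySem.List.slice paper none (some p), PySem.List.slice paper (some (p+1)) none)
  let second_half := halves.2.reverse
  (PySem.List.enumerate second_half 0).foldl
    (fun fp rr =>
      (PySem.List.enumerate rr.2 0).foldl
        (fun fp2 cc =>
          if cc.2 == "#" then
            PySem.List.pySetD fp2 rr.1 (PySem.List.pySetD (PySem.List.pyGetD fp2 rr.1 []) cc.1 cc.2)
          else fp2) fp) halves.1

def get_folded_paper (folded_paper : List (List String)) (fold_instructions : List (List String)) : List (List String) :=
  match fold_instructions with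
  | [] => folded_paper
  | instr :: rest =>
    let h := PySem.List.pyGetD instr 0 ""
    let paper1 := if h == "x" then fold_left_right folded_paper (PySem.List.pyGetD instr 1 "") else folded_paper
    let paper2 := if h == "y" then fold_bottom_up paper1 (PySem.List.pyGetD instr 1 "") else paper1
    get_folded_paper paper2 rest

-- ===== PORT B =====

-- merge_row: [b if b=='#' else a for a,b in zip(first,second)] + first[len(second):]
def merge_row (first second : List String) : List String :=
  List.zipWith (fun a b => if b == "#" then b else a) first second
    ++ PySem.List.slice first (some (second.length : Int)) none

def get_folded_paper_alt (folded_paper : List (List String)) (fold_instructions : List (List String)) : List (List String) :=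
  fold_instructions.foldl (fun paper instr =>
    let axis := PySem.List.pyGetD instr 0 ""
    if axis == "x" then
      let p : Int := pvParseInt (PySem.List.pyGetD instr 1 "")
      paper.map (fun row =>
        merge_row (PySem.List.slice row none (some p)) ((PySem.List.slice row (some (p+1)) none).reverse))
    else if axis == "y" then
      let p : Int := pvParseInt (PySem.List.pyGetD instr 1 "")
      let keep := PySem.List.slice paper none (some p)
      let flap := (if paper.length % 2 == 0 then PySem.List.slice paper (some p) none
                   else PySem.List.slice paper (some (p+1)) none).reverse
      List.zipWith merge_row keep flap ++ PySem.List.slice keep (some (flap.length : Int)) none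
    else paper) folded_paper

-- ===== PRECONDITION & SPEC =====
-- Shape check: every instruction is nonempty; an 'x'/'y' instruction carries a position that
-- int() parses to a nonnegative p sitting at the midpoint of the current width/height
-- (dim = 2p or 2p+1), the dimensions being tracked per instruction (x: width := p, y: height := p).
def preAux : Nat → Nat → List (List String) → Bool
  | _, _, [] => true
  | _, _, [] :: _ => false
  | n, m, (axis :: tl) :: rest =>
      if axis == "x" then
        match tl.head?.bind PySem.Int.ofStr? with
        | some p => decide (0 ≤ p) && (m == 2*p.toNat || m == 2*p.toNat+1) && preAux n p.toNat rest
        | none => false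
      else if axis == "y" then
        match tl.head?.bind PySem.Int.ofStr? with
        | some p => decide (0 ≤ p) && (n == 2*p.toNat || n == 2*p.toNat+1) && preAux p.toNat m rest
        | none => false
      else preAux n m rest

-- Pre_ excludes the inputs where A raises: an empty instruction (IndexError), an 'x'/'y' position
-- int() cannot parse (ValueError), and the data-dependent IndexError of A's index writes; since the
-- latter depends on where '#' sits, Pre_ conservatively admits only rectangular papers whose x/y
-- folds are at the midpoint of the current width/height, which excludes some ragged/off-midpoint
-- inputs on which A happens to return (B returns the same value there; see the claim cites).
def Pre_get_folded_paper (folded_paper : List (List String)) (fold_instructions : List (List String)) : Prop :=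
  (folded_paper.all (fun r => r.length == (folded_paper.headD []).length)
    && preAux folded_paper.length (folded_paper.headD []).length fold_instructions) = true

instance (folded_paper : List (List String)) (fold_instructions : List (List String)) : Decidable (Pre_get_folded_paper folded_paper fold_instructions) := by unfold Pre_get_folded_paper; infer_instance

def pvWitness_get_folded_paper : List (List String) × List (List String) :=
  ([["#", ".", "#"], [".", "#", "."], ["#", ".", "."]], [["x", "1"], ["y", "1"]])

def Spec_get_folded_paper (folded_paper : List (List String)) (fold_instructions : List (List String)) (out : List (List String)) : Prop := out = get_folded_paper_alt folded_paper fold_instructions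
instance (folded_paper : List (List String)) (fold_instructions : List (List String)) (out : List (List String)) : Decidable (Spec_get_folded_paper folded_paper fold_instructions out) := by unfold Spec_get_folded_paper; infer_instance

-- ===== CLAIM (what is proved, stated in full; the proofs are below) =====
def Claim_equal_get_folded_paper : Prop := ∀ (folded_paper : List (List String)) (fold_instructions : List (List String)), Dom_get_folded_paper folded_paper fold_instructions → Pre_get_folded_paper folded_paper fold_instructions → Spec_get_folded_paper folded_paper fold_instructions (get_folded_paper folded_paper fold_instructions)

-- ===== LEMMAS AND PROOFS =====

-- the two loop bodies of A, named for the proofs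
def stepS : List String → Int × String → List String :=
  fun fr pi => if pi.2 == "#" then PySem.List.pySetD fr pi.1 pi.2 else fr
def stepP : Int → List (List String) → Int × String → List (List String) :=
  fun rn fp cc =>
    if cc.2 == "#" then
      PySem.List.pySetD fp rn (PySem.List.pySetD (PySem.List.pyGetD fp rn []) cc.1 cc.2)
    else fp

lemma pySetD_zero_cons {α : Type} (a : α) (as : List α) (v : α) :
    PySem.List.pySetD (a :: as) 0 v = v :: as := by
  simp [PySem.List.pySetD, PySem.List.pySet?, PySem.List.pyIdx?]

lemma pySetD_cons_succ {α : Type} (a : α) (as : List α) (s : Int) (hs : 0 ≤ s) (v : α) :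
    PySem.List.pySetD (a :: as) (s + 1) v = a :: PySem.List.pySetD as s v := by
  simp only [PySem.List.pySetD, PySem.List.pySet?, PySem.List.pyIdx?, List.length_cons]
  by_cases h : s < (as.length : Int)
  · rw [if_pos (by omega), if_pos (by omega), if_pos hs, if_pos h]
    simp only [Option.map_some, Option.getD_some]
    have : (s+1).toNat = s.toNat + 1 := by omega
    rw [this, List.set_cons_succ]
  · rw [if_pos (by omega), if_neg (by push_cast; omega), if_pos hs, if_neg h]
    simp

lemma pyGetD_cons_succ {α : Type} (a : α) (as : List α) (s : Int) (hs : 0 ≤ s) (d : α) :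
    PySem.List.pyGetD (a :: as) (s + 1) d = PySem.List.pyGetD as s d := by
  simp only [PySem.List.pyGetD, PySem.List.pyGet?, PySem.List.pyIdx?, List.length_cons]
  by_cases h : s < (as.length : Int)
  · rw [if_pos (by omega), if_pos (by omega), if_pos hs, if_pos h]
    have : (s+1).toNat = s.toNat + 1 := by omega
    simp [this]
  · rw [if_pos (by omega), if_neg (by push_cast; omega), if_pos hs, if_neg h]
    simp

lemma shiftS (bs : List String) : ∀ (s : Int), 0 ≤ s → ∀ (a : String) (as : List String),
    (PySem.List.enumerate bs (s + 1)).foldl stepS (a :: as)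
      = a :: (PySem.List.enumerate bs s).foldl stepS as := by
  induction bs with
  | nil => intro s hs a as; simp [PySem.List.enumerate]
  | cons c cs ih =>
    intro s hs a as
    simp only [PySem.List.enumerate_cons, List.foldl_cons]
    have hstep : stepS (a :: as) (s + 1, c) = a :: stepS as (s, c) := by
      simp only [stepS]
      by_cases h : c == "#"
      · rw [if_pos h, if_pos h, pySetD_cons_succ a as s hs]
      · rw [if_neg h, if_neg h]
    rw [hstep]
    exact ih (s+1) (by omega) a (stepS as (s, c))

lemma ovS (second : List String) : ∀ (first : List String), second.length ≤ first.length →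
    (PySem.List.enumerate second 0).foldl stepS first
      = List.zipWith (fun a b => if b == "#" then b else a) first second
          ++ first.drop second.length := by
  induction second with
  | nil => intro first h; simp [PySem.List.enumerate]
  | cons b bs ih =>
    intro first h
    match first with
    | [] => simp at h
    | a :: as =>
      simp only [PySem.List.enumerate_cons, List.foldl_cons]
      have hstep : stepS (a :: as) (0, b) = (if b == "#" then b else a) :: as := by
        simp only [stepS]
        by_cases hb : b == "#"
        · rw [if_pos hb, if_pos hb, pySetD_zero_cons]
        · rw [if_neg hb, if_neg hb]
      rw [hstep, show (0:Int) + 1 = 0 + 1 by ring]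
      rw [shiftS bs 0 (by omega)]
      rw [ih as (by simpa using h)]
      simp

lemma innerP_comm (row : List String) : ∀ (t s : Int), 0 ≤ s →
    ∀ (a : List String) (as : List (List String)),
    (PySem.List.enumerate row t).foldl (stepP (s + 1)) (a :: as)
      = a :: (PySem.List.enumerate row t).foldl (stepP s) as := by
  induction row with
  | nil => intro t s hs a as; simp [PySem.List.enumerate]
  | cons c cs ih =>
    intro t s hs a as
    simp only [PySem.List.enumerate_cons, List.foldl_cons]
    have hstep : stepP (s+1) (a :: as) (t, c) = a :: stepP s as (t, c) := by
      simp only [stepP]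
      by_cases h : c == "#"
      · rw [if_pos h, if_pos h, pyGetD_cons_succ a as s hs, pySetD_cons_succ a as s hs]
      · rw [if_neg h, if_neg h]
    rw [hstep]
    exact ih (t+1) s hs a (stepP s as (t, c))

lemma innerP_zero (row : List String) : ∀ (t : Int) (a : List String) (as : List (List String)),
    (PySem.List.enumerate row t).foldl (stepP 0) (a :: as)
      = ((PySem.List.enumerate row t).foldl stepS a) :: as := by
  induction row with
  | nil => intro t a as; simp [PySem.List.enumerate]
  | cons c cs ih =>
    intro t a as
    simp only [PySem.List.enumerate_cons, List.foldl_cons]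
    have hstep : stepP 0 (a :: as) (t, c) = stepS a (t, c) :: as := by
      simp only [stepP, stepS]
      by_cases h : c == "#"
      · rw [if_pos h, if_pos h]
        rw [show PySem.List.pyGetD (a :: as) 0 [] = a from PySem.List.pyGetD_zero_cons a as []]
        rw [pySetD_zero_cons]
      · rw [if_neg h, if_neg h]
    rw [hstep]
    exact ih (t+1) (stepS a (t, c)) as

lemma shiftP (bs : List (List String)) : ∀ (s : Int), 0 ≤ s →
    ∀ (a : List String) (as : List (List String)),
    (PySem.List.enumerate bs (s + 1)).foldl
        (fun fp rr => (PySem.List.enumerate rr.2 0).foldl (stepP rr.1) fp) (a :: as)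
      = a :: (PySem.List.enumerate bs s).foldl
            (fun fp rr => (PySem.List.enumerate rr.2 0).foldl (stepP rr.1) fp) as := by
  induction bs with
  | nil => intro s hs a as; simp [PySem.List.enumerate]
  | cons c cs ih =>
    intro s hs a as
    simp only [PySem.List.enumerate_cons, List.foldl_cons]
    rw [show ((PySem.List.enumerate c 0).foldl (stepP (s+1)) (a :: as))
          = a :: (PySem.List.enumerate c 0).foldl (stepP s) as from innerP_comm c 0 s hs a as]
    exact ih (s+1) (by omega) a _

lemma ovP (second : List (List String)) : ∀ (first : List (List String)),
    second.length ≤ first.length →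
    (PySem.List.enumerate second 0).foldl
        (fun fp rr => (PySem.List.enumerate rr.2 0).foldl (stepP rr.1) fp) first
      = List.zipWith (fun a b => (PySem.List.enumerate b 0).foldl stepS a) first second
          ++ first.drop second.length := by
  induction second with
  | nil => intro first h; simp [PySem.List.enumerate]
  | cons b bs ih =>
    intro first h
    match first with
    | [] => simp at h
    | a :: as =>
      simp only [PySem.List.enumerate_cons, List.foldl_cons]
      rw [innerP_zero b 0 a as, show (0:Int) + 1 = 0 + 1 by ring, shiftP bs 0 (by omega)]
      rw [ih as (by simpa using h)]
      simp

lemma merge_row_eq (f s : List String) :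
    merge_row f s = List.zipWith (fun a b => if b == "#" then b else a) f s ++ f.drop s.length := by
  rw [merge_row, PySem.List.slice_from_natCast]

lemma length_merge_row (f s : List String) (h : s.length ≤ f.length) :
    (merge_row f s).length = f.length := by
  rw [merge_row_eq]; simp; omega

lemma zipWith_congr_mem {α β γ : Type} (f g : α → β → γ) : ∀ (l1 : List α) (l2 : List β),
    (∀ a ∈ l1, ∀ b ∈ l2, f a b = g a b) →
    List.zipWith f l1 l2 = List.zipWith g l1 l2 := by
  intro l1
  induction l1 with
  | nil => intro l2 h; simp
  | cons a as ih =>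
    intro l2 h
    cases l2 with
    | nil => simp
    | cons b bs =>
      simp only [List.zipWith_cons_cons]
      rw [h a (by simp) b (by simp), ih bs (fun x hx y hy => h x (by simp [hx]) y (by simp [hy]))]

lemma fold_left_right_eq (paper : List (List String)) (pos : String) (p : Int) (m : Nat)
    (hp : pvParseInt pos = p) (hp0 : 0 ≤ p)
    (hrect : ∀ r ∈ paper, r.length = m) (hm : m ≤ 2 * p.toNat + 1) :
    fold_left_right paper pos
      = paper.map (fun row =>
          merge_row (PySem.List.slice row none (some p))
            ((PySem.List.slice row (some (p+1)) none).reverse)) := by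
  subst hp
  refine Eq.trans (b := paper.map (fun row =>
      (PySem.List.enumerate ((PySem.List.slice row (some (pvParseInt pos + 1)) none).reverse) 0).foldl
        stepS (PySem.List.slice row none (some (pvParseInt pos))))) ?_ ?_
  · show List.foldl (fun acc row => acc ++ [(fun row =>
      (PySem.List.enumerate ((PySem.List.slice row (some (pvParseInt pos + 1)) none).reverse) 0).foldl
        stepS (PySem.List.slice row none (some (pvParseInt pos)))) row]) [] paper = _
    exact (PySem.List.foldl_append_singleton_eq_map _ paper []).trans (by simp)
  · apply List.map_congr_left
    intro row hrow
    obtain ⟨k, hk⟩ : ∃ k : Nat, pvParseInt pos = (k : Int) :=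
      ⟨(pvParseInt pos).toNat, (Int.toNat_of_nonneg hp0).symm⟩
    rw [hk] at hm ⊢
    rw [show ((k:Int) + 1) = ((k+1 : Nat) : Int) by push_cast; ring]
    rw [PySem.List.slice_to_natCast, PySem.List.slice_from_natCast]
    rw [ovS _ _ (by simp [hrect row hrow]; omega), merge_row_eq]

lemma fold_bottom_up_eq (paper : List (List String)) (pos : String) (p : Int) (m : Nat)
    (hp : pvParseInt pos = p) (hp0 : 0 ≤ p)
    (hrect : ∀ r ∈ paper, r.length = m)
    (hn : paper.length = 2 * p.toNat ∨ paper.length = 2 * p.toNat + 1) :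
    fold_bottom_up paper pos
      = (let keep := PySem.List.slice paper none (some p)
         let flap := (if paper.length % 2 == 0 then PySem.List.slice paper (some p) none
                      else PySem.List.slice paper (some (p+1)) none).reverse
         List.zipWith merge_row keep flap ++ PySem.List.slice keep (some (flap.length : Int)) none) := by
  subst hp
  obtain ⟨k, hk⟩ : ∃ k : Nat, pvParseInt pos = (k : Int) :=
    ⟨(pvParseInt pos).toNat, (Int.toNat_of_nonneg hp0).symm⟩
  rw [hk] at hn ⊢
  simp only [Int.toNat_natCast] at hn
  unfold fold_bottom_up
  rw [hk]
  simp only []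
  by_cases hpar : (paper.length % 2 == 0) = true
  · have hne : paper.length = 2 * k := by
      rcases hn with h | h
      · exact h
      · exfalso; revert hpar; simp [h]
    simp only [hpar, if_true]
    rw [show ((k:Int)) = ((k:Nat):Int) from rfl]
    rw [PySem.List.slice_to_natCast, PySem.List.slice_from_natCast]
    have hlen : ((List.drop k paper).reverse).length ≤ (List.take k paper).length := by
      simp; omega
    refine Eq.trans (ovP ((List.drop k paper).reverse) (List.take k paper) hlen) ?_
    rw [PySem.List.slice_from_natCast]
    congr 1
    apply zipWith_congr_mem
    intro a ha b hb
    have hla : a.length = m := hrect a (List.mem_of_mem_take ha)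
    have hlb : b.length = m := hrect b (List.mem_of_mem_drop (List.mem_reverse.mp hb))
    rw [ovS _ _ (by omega), merge_row_eq]
  · have hno : paper.length = 2 * k + 1 := by
      rcases hn with h | h
      · exfalso; revert hpar; simp [h, Nat.mul_mod_right]
      · exact h
    simp only [hpar, if_false, Bool.false_eq_true]
    rw [show ((k:Int) + 1) = ((k+1 : Nat) : Int) by push_cast; ring]
    rw [show ((k:Int)) = ((k:Nat):Int) from rfl]
    rw [PySem.List.slice_to_natCast, PySem.List.slice_from_natCast]
    have hlen : ((List.drop (k+1) paper).reverse).length ≤ (List.take k paper).length := by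
      simp; omega
    refine Eq.trans (ovP ((List.drop (k+1) paper).reverse) (List.take k paper) hlen) ?_
    rw [PySem.List.slice_from_natCast]
    congr 1
    apply zipWith_congr_mem
    intro a ha b hb
    have hla : a.length = m := hrect a (List.mem_of_mem_take ha)
    have hlb : b.length = m := hrect b (List.mem_of_mem_drop (List.mem_reverse.mp hb))
    rw [ovS _ _ (by omega), merge_row_eq]

lemma pyGetD_one_cons_cons {α : Type} (a b : α) (l : List α) (d : α) :
    PySem.List.pyGetD (a :: b :: l) 1 d = b := by
  have h := pyGetD_cons_succ a (b :: l) 0 le_rfl d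
  simpa [PySem.List.pyGetD_zero_cons] using h

lemma zipWith_mem {α β γ : Type} (f : α → β → γ) : ∀ (l1 : List α) (l2 : List β),
    ∀ c ∈ List.zipWith f l1 l2, ∃ a ∈ l1, ∃ b ∈ l2, c = f a b := by
  intro l1
  induction l1 with
  | nil => simp
  | cons a as ih =>
    intro l2 c hc
    cases l2 with
    | nil => simp at hc
    | cons b bs =>
      simp only [List.zipWith_cons_cons, List.mem_cons] at hc
      rcases hc with h | h
      · exact ⟨a, by simp, b, by simp, h⟩
      · rcases ih bs c h with ⟨x, hx, y, hy, hxy⟩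
        exact ⟨x, by simp [hx], y, by simp [hy], hxy⟩

def bstep (paper : List (List String)) (instr : List String) : List (List String) :=
  let axis := PySem.List.pyGetD instr 0 ""
  if axis == "x" then
    let p : Int := pvParseInt (PySem.List.pyGetD instr 1 "")
    paper.map (fun row =>
      merge_row (PySem.List.slice row none (some p)) ((PySem.List.slice row (some (p+1)) none).reverse))
  else if axis == "y" then
    let p : Int := pvParseInt (PySem.List.pyGetD instr 1 "")
    let keep := PySem.List.slice paper none (some p)
    let flap := (if paper.length % 2 == 0 then PySem.List.slice paper (some p) none
                 else PySem.List.slice paper (some (p+1)) none).reverse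
    List.zipWith merge_row keep flap ++ PySem.List.slice keep (some (flap.length : Int)) none
  else paper

lemma alt_cons (paper : List (List String)) (instr : List String) (rest : List (List String)) :
    get_folded_paper_alt paper (instr :: rest) = get_folded_paper_alt (bstep paper instr) rest := rfl

lemma main_eq (instrs : List (List String)) : ∀ (paper : List (List String)) (m : Nat),
    (∀ r ∈ paper, r.length = m) → preAux paper.length m instrs = true →
    get_folded_paper paper instrs = get_folded_paper_alt paper instrs := by
  induction instrs with
  | nil => intro paper m _ _; rfl
  | cons instr rest ih =>
    intro paper m hrect hpre
    match instr with
    | [] => simp [preAux] at hpre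
    | axis :: tl =>
      rw [preAux] at hpre
      by_cases hx : (axis == "x") = true
      · rw [if_pos hx] at hpre
        cases hv : tl.head?.bind PySem.Int.ofStr? with
        | none => rw [hv] at hpre; simp at hpre
        | some p =>
          rw [hv] at hpre
          simp only [Bool.and_eq_true, decide_eq_true_eq, Bool.or_eq_true, beq_iff_eq] at hpre
          obtain ⟨⟨hp0, hm⟩, hrest⟩ := hpre
          have haxis : axis = "x" := by simpa using hx
          subst haxis
          match tl with
          | v :: tl' =>
            rw [show (v :: tl').head?.bind PySem.Int.ofStr? = PySem.Int.ofStr? v from rfl] at hv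
            have hpa : pvParseInt v = p := by simp [pvParseInt, hv]
            rw [show get_folded_paper paper (("x" :: v :: tl') :: rest)
                = get_folded_paper (fold_left_right paper v) rest from by
              simp [get_folded_paper, PySem.List.pyGetD_zero_cons, pyGetD_one_cons_cons]]
            rw [fold_left_right_eq paper v p m hpa hp0 hrect (by omega)]
            simp only [get_folded_paper_alt, List.foldl_cons, PySem.List.pyGetD_zero_cons,
              pyGetD_one_cons_cons, hpa, beq_self_eq_true, if_true]
            have hrect' : ∀ r' ∈ paper.map (fun row =>
                merge_row (PySem.List.slice row none (some p))
                  ((PySem.List.slice row (some (p+1)) none).reverse)), r'.length = p.toNat := by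
              intro r' hr'
              obtain ⟨row, hrow, rfl⟩ := List.mem_map.mp hr'
              obtain ⟨k, hk⟩ : ∃ k : Nat, p = (k : Int) := ⟨p.toNat, (Int.toNat_of_nonneg hp0).symm⟩
              rw [hk] at hm ⊢
              rw [show ((k:Int) + 1) = ((k+1 : Nat) : Int) by push_cast; ring]
              rw [PySem.List.slice_to_natCast, PySem.List.slice_from_natCast]
              rw [length_merge_row _ _ (by simp [hrect row hrow]; omega)]
              simp [hrect row hrow]
              omega
            have := ih _ p.toNat hrect' (by simpa using hrest)
            exact this
      · rw [if_neg hx] at hpre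
        by_cases hy : (axis == "y") = true
        · rw [if_pos hy] at hpre
          cases hv : tl.head?.bind PySem.Int.ofStr? with
          | none => rw [hv] at hpre; simp at hpre
          | some p =>
            rw [hv] at hpre
            simp only [Bool.and_eq_true, decide_eq_true_eq, Bool.or_eq_true, beq_iff_eq] at hpre
            obtain ⟨⟨hp0, hn⟩, hrest⟩ := hpre
            have haxis : axis = "y" := by simpa using hy
            subst haxis
            match tl with
            | v :: tl' =>
              rw [show (v :: tl').head?.bind PySem.Int.ofStr? = PySem.Int.ofStr? v from rfl] at hv
              have hpa : pvParseInt v = p := by simp [pvParseInt, hv]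
              rw [show get_folded_paper paper (("y" :: v :: tl') :: rest)
                  = get_folded_paper (fold_bottom_up paper v) rest from by
                simp [get_folded_paper, PySem.List.pyGetD_zero_cons, pyGetD_one_cons_cons]]
              rw [fold_bottom_up_eq paper v p m hpa hp0 hrect hn]
              rw [alt_cons]
              rw [show bstep paper ("y" :: v :: tl')
                  = (let keep := PySem.List.slice paper none (some p)
                     let flap := (if paper.length % 2 == 0 then PySem.List.slice paper (some p) none
                                  else PySem.List.slice paper (some (p+1)) none).reverse
                     List.zipWith merge_row keep flap
                       ++ PySem.List.slice keep (some (flap.length : Int)) none) from by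
                unfold bstep
                simp only [PySem.List.pyGetD_zero_cons, pyGetD_one_cons_cons, hpa,
                  show (("y":String) == "x") = false from rfl, Bool.false_eq_true, if_false,
                  beq_self_eq_true, if_true]]
              obtain ⟨k, hk⟩ : ∃ k : Nat, p = (k : Int) := ⟨p.toNat, (Int.toNat_of_nonneg hp0).symm⟩
              subst hk
              simp only [Int.toNat_natCast] at hn hrest
              simp only [show ((k:Int) + 1) = ((k+1 : Nat) : Int) by push_cast; ring,
                PySem.List.slice_to_natCast, PySem.List.slice_from_natCast]
              by_cases hpar : (paper.length % 2 == 0) = true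
              · have hne : paper.length = 2 * k := by
                  rcases hn with h | h
                  · exact h
                  · exfalso; revert hpar; simp [h]
                simp only [hpar, if_true]
                have hrect' : ∀ r' ∈ (List.zipWith merge_row (List.take k paper) (List.drop k paper).reverse
                      ++ (List.take k paper).drop ((List.drop k paper).reverse.length)), r'.length = m := by
                  intro r' hr'
                  rcases List.mem_append.mp hr' with h | h
                  · rcases zipWith_mem _ _ _ _ h with ⟨a, ha, b, hb, rfl⟩
                    have hla : a.length = m := hrect a (List.mem_of_mem_take ha)
                    have hlb : b.length = m := hrect b (List.mem_of_mem_drop (List.mem_reverse.mp hb))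
                    rw [length_merge_row _ _ (by omega)]; exact hla
                  · exact hrect _ (List.mem_of_mem_take (List.mem_of_mem_drop h))
                have hlen : (List.zipWith merge_row (List.take k paper) (List.drop k paper).reverse
                      ++ (List.take k paper).drop ((List.drop k paper).reverse.length)).length = k := by
                  simp; omega
                exact ih _ m hrect' (by rw [hlen]; exact hrest)
              · have hno : paper.length = 2 * k + 1 := by
                  rcases hn with h | h
                  · exfalso; revert hpar; simp [h, Nat.mul_mod_right]
                  · exact h
                simp only [hpar, if_false, Bool.false_eq_true]
                have hrect' : ∀ r' ∈ (List.zipWith merge_row (List.take k paper) (List.drop (k+1) paper).reverse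
                      ++ (List.take k paper).drop ((List.drop (k+1) paper).reverse.length)), r'.length = m := by
                  intro r' hr'
                  rcases List.mem_append.mp hr' with h | h
                  · rcases zipWith_mem _ _ _ _ h with ⟨a, ha, b, hb, rfl⟩
                    have hla : a.length = m := hrect a (List.mem_of_mem_take ha)
                    have hlb : b.length = m := hrect b (List.mem_of_mem_drop (List.mem_reverse.mp hb))
                    rw [length_merge_row _ _ (by omega)]; exact hla
                  · exact hrect _ (List.mem_of_mem_take (List.mem_of_mem_drop h))
                have hlen : (List.zipWith merge_row (List.take k paper) (List.drop (k+1) paper).reverse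
                      ++ (List.take k paper).drop ((List.drop (k+1) paper).reverse.length)).length = k := by
                  simp; omega
                exact ih _ m hrect' (by rw [hlen]; exact hrest)
        · rw [if_neg hy] at hpre
          rw [show get_folded_paper paper ((axis :: tl) :: rest)
              = get_folded_paper paper rest from by
            simp [get_folded_paper, PySem.List.pyGetD_zero_cons, hx, hy]]
          simp only [get_folded_paper_alt, List.foldl_cons, PySem.List.pyGetD_zero_cons]
          rw [if_neg hx, if_neg hy]
          exact ih paper m hrect hpre

-- ===== VERDICT (by name: the statement is the Claim_ definition above) =====
theorem get_folded_paper_spec : Claim_equal_get_folded_paper := by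
  intro fp fi _hdom hpre
  unfold Spec_get_folded_paper
  unfold Pre_get_folded_paper at hpre
  simp only [Bool.and_eq_true, List.all_eq_true] at hpre
  exact main_eq fi fp (fp.headD []).length
    (fun r hr => by have := hpre.1 r hr; simpa using this) hpre.2
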